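/- PORTED by tools/port_fixed.py from Prog/Jsmn/D/StrLemmas.lean to THE FIXED IMAGE fixed/jsmn_d.bin (same bytes at the same addresses; binFD). Do not edit: edit the original and port again. -/
/-
  jsmn, `jsmn_parse_string`: the pure facts about characters that the escape switch and the hex test need (no machine state here).
-/
import Prog.Jsmn.Fixed.Specs
import Prog.Jsmn.Fixed.CodeFD
import Prog.Jsmn.Fixed.D.StrInv
namespace X86
namespace J6
namespace FD
namespace Str
open X86.User (CodeAt RegsKept Span FlagsOK Layout toNat_add_ofNat toNat_ofNat_lt' add_ofNat_add)
open Jsmn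

set_option maxRecDepth 100000

/-- `isSimpleEscape` by the character's number. -/
theorem simple_iff (ch : UInt8) : isSimpleEscape ch = true ↔
    (ch.toNat = 34 ∨ ch.toNat = 47 ∨ ch.toNat = 92 ∨ ch.toNat = 98 ∨ ch.toNat = 102 ∨ ch.toNat = 114 ∨ ch.toNat = 110 ∨ ch.toNat = 116) := by
  simp [isSimpleEscape, byte_beq_eq_decide]; omega

theorem simple_false (ch : UInt8) (h : ¬ (ch.toNat = 34 ∨ ch.toNat = 47 ∨ ch.toNat = 92 ∨ ch.toNat = 98 ∨ ch.toNat = 102 ∨ ch.toNat = 114 ∨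
    ch.toNat = 110 ∨ ch.toNat = 116)) : isSimpleEscape ch = false := by
  cases e : isSimpleEscape ch with
  | false => rfl
  | true => exact absurd ((simple_iff ch).mp e) h

/-- `isHex` by the character's number. -/
theorem hex_iff (ch : UInt8) : isHex ch = true ↔
    ((48 ≤ ch.toNat ∧ ch.toNat ≤ 57) ∨ (65 ≤ ch.toNat ∧ ch.toNat ≤ 70) ∨ (97 ≤ ch.toNat ∧ ch.toNat ≤ 102)) := by
  simp [isHex]; omega

/-- **The escape switch's bit test** (`mov eax, 1 ; shl rax, cl ; test eax, 1440441H ; test eax, 2000000H` with cl = c - 5CH, 5CH ≤ c ≤ 75H):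
the first mask selects `\` `b` `f` `n` `r` `t`, the second `u`. -/
theorem esc_bits : ∀ k < 26,
    (((Word.shift .shl .w64 1 (Word.low .w8 (UInt64.ofNat (k + 92) - 92))) &&& 21234753).toNat % 4294967296 ≠ 0 ↔
      (k = 0 ∨ k = 6 ∨ k = 10 ∨ k = 18 ∨ k = 22 ∨ k = 24)) ∧
    (((Word.shift .shl .w64 1 (Word.low .w8 (UInt64.ofNat (k + 92) - 92))) &&& 33554432).toNat % 4294967296 ≠ 0 ↔ k = 25) := by
  decide

end Str
end FD
end J6
end X86
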